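-- pv_equiv track=rewrite | github.com/Amanms1402/Practice_DSA | Difficulty: Easy/Coverage of all Zeros in a Binary Matrix/coverage-of-all-zeros-in-a-binary-matrix.py | findCoverage
-- ===== SOURCE A (Python) =====
-- def findCoverage(matrix):
--     count, row, col = 0, len(matrix), len(matrix[0])
--
--     for i in range(row):
--         for j in range(col):
--             if matrix[i][j]:
--                 count+=int(-1<i-1<row and not matrix[i-1][j])
--                 count+=int(-1<j-1<col and not matrix[i][j-1])
--                 count+=int(-1<i+1<row and not matrix[i+1][j])
--                 count+=int(-1<j+1<col and not matrix[i][j+1])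
--
--     return count
-- ===== SOURCE B (Python) =====
-- def findCoverage(matrix):
--     col = len(matrix[0])
--     rows = [r[:col] for r in matrix]
--     count = 0
--     for r in rows:
--         for a, b in zip(r, r[1:]):
--             if bool(a) != bool(b):
--                 count += 1
--     for r1, r2 in zip(rows, rows[1:]):
--         for a, b in zip(r1, r2):
--             if bool(a) != bool(b):
--                 count += 1
--     return count
-- ===== Notes on version B (the rewrite author's own statement) =====
-- stated objective: faster
-- what changed: B counts each unordered adjacent pair of differing truthiness once by zipping each row with its shift (zip(r, r[1:])) and consecutive rows (zip(rows, rows[1:])), instead of A's per-1-cell scan of all four neighbours through guarded index arithmetic.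
import Mathlib
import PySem

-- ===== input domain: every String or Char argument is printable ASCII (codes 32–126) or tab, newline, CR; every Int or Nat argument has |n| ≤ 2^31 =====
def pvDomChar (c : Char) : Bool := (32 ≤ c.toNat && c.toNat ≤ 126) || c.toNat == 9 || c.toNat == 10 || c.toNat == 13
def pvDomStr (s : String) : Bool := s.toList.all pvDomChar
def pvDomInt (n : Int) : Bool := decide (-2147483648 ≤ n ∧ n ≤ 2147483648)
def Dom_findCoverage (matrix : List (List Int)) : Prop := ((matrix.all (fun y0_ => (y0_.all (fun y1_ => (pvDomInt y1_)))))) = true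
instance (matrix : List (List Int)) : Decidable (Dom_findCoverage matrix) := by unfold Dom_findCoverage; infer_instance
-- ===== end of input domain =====

-- B counts each adjacent pair of differing truthiness once (zip of rows/shifted rows) instead of A's per-1-cell four-neighbour scan with guarded index arithmetic; same asymptotics, measurably faster constant factor (direct iteration instead of repeated indexed lookups).


-- ===== PORT A =====
-- matrix[i][j]; every use in the port is index-guarded and Pre_ makes rows long enough, so the default is never taken
def pvCell (matrix : List (List Int)) (i j : Int) : Int :=
  PySem.List.pyGetD (PySem.List.pyGetD matrix i []) j 0

def findCoverage (matrix : List (List Int)) : Int :=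
  let row : Int := matrix.length
  let col : Int := (matrix.headD []).length   -- len(matrix[0]); the empty matrix (IndexError) is excluded by Pre_
  (PySem.List.pyRange 0 row 1).foldl (fun count i =>
    (PySem.List.pyRange 0 col 1).foldl (fun count j =>
      if pvCell matrix i j ≠ 0 then
        count + (if -1 < i-1 ∧ i-1 < row ∧ pvCell matrix (i-1) j = 0 then 1 else 0)
              + (if -1 < j-1 ∧ j-1 < col ∧ pvCell matrix i (j-1) = 0 then 1 else 0)
              + (if -1 < i+1 ∧ i+1 < row ∧ pvCell matrix (i+1) j = 0 then 1 else 0)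
              + (if -1 < j+1 ∧ j+1 < col ∧ pvCell matrix i (j+1) = 0 then 1 else 0)
      else count) count) 0

-- ===== PORT B =====
-- bool(a) != bool(b) as a 0/1 increment
def pvDiff (a b : Int) : Int := if (decide (a ≠ 0)) ≠ (decide (b ≠ 0)) then 1 else 0

def findCoverage_alt (matrix : List (List Int)) : Int :=
  let col : Int := (matrix.headD []).length   -- len(matrix[0]); empty matrix excluded by Pre_
  let rows := matrix.map (fun r => PySem.List.slice r none (some col))   -- [r[:col] for r in matrix]
  let count := rows.foldl (fun count r =>
      (r.zip (PySem.List.slice r (some 1) none)).foldl   -- zip(r, r[1:])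
        (fun count p => count + pvDiff p.1 p.2) count) 0
  (rows.zip (PySem.List.slice rows (some 1) none)).foldl   -- zip(rows, rows[1:])
      (fun count q =>
        (q.1.zip q.2).foldl (fun count p => count + pvDiff p.1 p.2) count) count

-- ===== PRECONDITION & SPEC =====
-- Pre_ excludes exactly the inputs on which A raises IndexError: the empty matrix (matrix[0])
-- and ragged matrices with some row shorter than row 0 (matrix[i][j] out of range).
def Pre_findCoverage (matrix : List (List Int)) : Prop :=
  matrix ≠ [] ∧ ∀ r ∈ matrix, (matrix.headD []).length ≤ r.length
instance (matrix : List (List Int)) : Decidable (Pre_findCoverage matrix) := by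
  unfold Pre_findCoverage; infer_instance

def pvWitness_findCoverage : List (List Int) := [[1, 0], [0, 1]]

def Spec_findCoverage (matrix : List (List Int)) (out : Int) : Prop := out = findCoverage_alt matrix
instance (matrix : List (List Int)) (out : Int) : Decidable (Spec_findCoverage matrix out) := by unfold Spec_findCoverage; infer_instance

-- ===== CLAIM (what is proved, stated in full; the proofs are below) =====
def Claim_equal_findCoverage : Prop := ∀ (matrix : List (List Int)), Dom_findCoverage matrix → Pre_findCoverage matrix → Spec_findCoverage matrix (findCoverage matrix)

-- ===== LEMMAS AND PROOFS =====

-- the truthiness of cell (i,j), Nat-indexed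
def pvT (m : List (List Int)) (i j : Nat) : Bool := decide ((m.getD i []).getD j 0 ≠ 0)

-- generic: sum of a map over List.range as a Finset sum
theorem pv_sum_map_range (f : Nat → Int) (n : Nat) :
    ((List.range n).map f).sum = ∑ i ∈ Finset.range n, f i := by
  induction n with
  | zero => simp
  | succ n ih => rw [List.range_succ, Finset.sum_range_succ]; simp [ih]

-- generic: sum of a map over a list as an indexed Finset sum (with getD)
theorem pv_map_sum_getD {α : Type} (l : List α) (h : α → Int) (d : α) :
    (l.map h).sum = ∑ i ∈ Finset.range l.length, h (l.getD i d) := by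
  induction l with
  | nil => simp
  | cons x xs ih =>
      rw [List.map_cons, List.sum_cons, ih, List.length_cons, Finset.sum_range_succ']
      simp [add_comm]

theorem pv_combine (a b : Bool) :
    (if b = true ∧ a = false then (1:Int) else 0) + (if a = true ∧ b = false then 1 else 0)
      = (if a ≠ b then 1 else 0) := by
  cases a <;> cases b <;> decide

theorem pv_shiftL (u : Nat → Bool) (n : Nat) :
    (∑ k ∈ Finset.range n, if u k = true ∧ 1 ≤ k ∧ u (k-1) = false then (1:Int) else 0)
      = ∑ k ∈ Finset.range (n-1), if u (k+1) = true ∧ u k = false then 1 else 0 := by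
  cases n with
  | zero => simp
  | succ m =>
      rw [Finset.sum_range_succ']
      simp

theorem pv_shiftR (u : Nat → Bool) (n : Nat) :
    (∑ k ∈ Finset.range n, if u k = true ∧ k+1 < n ∧ u (k+1) = false then (1:Int) else 0)
      = ∑ k ∈ Finset.range (n-1), if u k = true ∧ u (k+1) = false then 1 else 0 := by
  cases n with
  | zero => simp
  | succ m =>
      rw [Finset.sum_range_succ]
      have h0 : (if u m = true ∧ m+1 < m+1 ∧ u (m+1) = false then (1:Int) else 0) = 0 := by simp
      rw [h0, add_zero, Nat.add_sub_cancel]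
      refine Finset.sum_congr rfl (fun k hk => ?_)
      simp only [Finset.mem_range] at hk
      have hk1 : k+1 < m+1 := by omega
      simp [hk1]

-- one row/column: left+right neighbour hits = differing adjacent pairs
theorem pv_onerow (u : Nat → Bool) (n : Nat) :
    (∑ k ∈ Finset.range n,
        ((if u k = true ∧ 1 ≤ k ∧ u (k-1) = false then (1:Int) else 0)
          + (if u k = true ∧ k+1 < n ∧ u (k+1) = false then 1 else 0)))
      = ∑ k ∈ Finset.range (n-1), if u k ≠ u (k+1) then 1 else 0 := by
  rw [Finset.sum_add_distrib, pv_shiftL, pv_shiftR, ← Finset.sum_add_distrib]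
  exact Finset.sum_congr rfl fun k _ => pv_combine _ _

-- the pure double-counting identity
theorem pv_core (t : Nat → Nat → Bool) (R C : Nat) :
    (∑ i ∈ Finset.range R, ∑ j ∈ Finset.range C,
        (if t i j = true then
          ((if 1 ≤ i ∧ t (i-1) j = false then (1:Int) else 0)
            + (if 1 ≤ j ∧ t i (j-1) = false then 1 else 0)
            + (if i+1 < R ∧ t (i+1) j = false then 1 else 0)
            + (if j+1 < C ∧ t i (j+1) = false then 1 else 0))
          else 0))
      = (∑ i ∈ Finset.range R, ∑ j ∈ Finset.range (C-1), (if t i j ≠ t i (j+1) then (1:Int) else 0))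
        + (∑ i ∈ Finset.range (R-1), ∑ j ∈ Finset.range C, (if t i j ≠ t (i+1) j then (1:Int) else 0)) := by
  have split : ∀ i j,
      (if t i j = true then
        ((if 1 ≤ i ∧ t (i-1) j = false then (1:Int) else 0)
          + (if 1 ≤ j ∧ t i (j-1) = false then 1 else 0)
          + (if i+1 < R ∧ t (i+1) j = false then 1 else 0)
          + (if j+1 < C ∧ t i (j+1) = false then 1 else 0))
        else 0)
      = ((if t i j = true ∧ 1 ≤ i ∧ t (i-1) j = false then (1:Int) else 0)
          + (if t i j = true ∧ 1 ≤ j ∧ t i (j-1) = false then 1 else 0))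
        + ((if t i j = true ∧ i+1 < R ∧ t (i+1) j = false then 1 else 0)
          + (if t i j = true ∧ j+1 < C ∧ t i (j+1) = false then 1 else 0)) := by
    intro i j
    by_cases h : t i j = true
    · simp [h]; ring
    · simp [h]
  rw [Finset.sum_congr rfl (fun i _ => Finset.sum_congr rfl (fun j _ => split i j))]
  simp only [Finset.sum_add_distrib]
  have hH : ∀ i, ((∑ j ∈ Finset.range C, if t i j = true ∧ 1 ≤ j ∧ t i (j-1) = false then (1:Int) else 0)
        + (∑ j ∈ Finset.range C, if t i j = true ∧ j+1 < C ∧ t i (j+1) = false then (1:Int) else 0))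
      = ∑ j ∈ Finset.range (C-1), (if t i j ≠ t i (j+1) then (1:Int) else 0) := by
    intro i
    rw [← Finset.sum_add_distrib]
    exact pv_onerow (fun j => t i j) C
  have hV : ((∑ i ∈ Finset.range R, ∑ j ∈ Finset.range C, if t i j = true ∧ 1 ≤ i ∧ t (i-1) j = false then (1:Int) else 0)
        + (∑ i ∈ Finset.range R, ∑ j ∈ Finset.range C, if t i j = true ∧ i+1 < R ∧ t (i+1) j = false then (1:Int) else 0))
      = ∑ i ∈ Finset.range (R-1), ∑ j ∈ Finset.range C, (if t i j ≠ t (i+1) j then (1:Int) else 0) := by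
    have swap1 : (∑ i ∈ Finset.range R, ∑ j ∈ Finset.range C, if t i j = true ∧ 1 ≤ i ∧ t (i-1) j = false then (1:Int) else 0)
        = ∑ j ∈ Finset.range C, ∑ i ∈ Finset.range R, if t i j = true ∧ 1 ≤ i ∧ t (i-1) j = false then (1:Int) else 0 :=
      Finset.sum_comm
    have swap2 : (∑ i ∈ Finset.range R, ∑ j ∈ Finset.range C, if t i j = true ∧ i+1 < R ∧ t (i+1) j = false then (1:Int) else 0)
        = ∑ j ∈ Finset.range C, ∑ i ∈ Finset.range R, if t i j = true ∧ i+1 < R ∧ t (i+1) j = false then (1:Int) else 0 :=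
      Finset.sum_comm
    rw [swap1, swap2, ← Finset.sum_add_distrib]
    refine Eq.trans (Finset.sum_congr rfl (fun j _ => ?_)) Finset.sum_comm
    rw [← Finset.sum_add_distrib]
    exact pv_onerow (fun i => t i j) R
  calc ((∑ i ∈ Finset.range R, ∑ j ∈ Finset.range C, if t i j = true ∧ 1 ≤ i ∧ t (i-1) j = false then (1:Int) else 0)
          + (∑ i ∈ Finset.range R, ∑ j ∈ Finset.range C, if t i j = true ∧ 1 ≤ j ∧ t i (j-1) = false then (1:Int) else 0))
        + ((∑ i ∈ Finset.range R, ∑ j ∈ Finset.range C, if t i j = true ∧ i+1 < R ∧ t (i+1) j = false then (1:Int) else 0)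
          + (∑ i ∈ Finset.range R, ∑ j ∈ Finset.range C, if t i j = true ∧ j+1 < C ∧ t i (j+1) = false then (1:Int) else 0))
      = ((∑ i ∈ Finset.range R, ∑ j ∈ Finset.range C, if t i j = true ∧ 1 ≤ j ∧ t i (j-1) = false then (1:Int) else 0)
          + (∑ i ∈ Finset.range R, ∑ j ∈ Finset.range C, if t i j = true ∧ j+1 < C ∧ t i (j+1) = false then (1:Int) else 0))
        + ((∑ i ∈ Finset.range R, ∑ j ∈ Finset.range C, if t i j = true ∧ 1 ≤ i ∧ t (i-1) j = false then (1:Int) else 0)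
          + (∑ i ∈ Finset.range R, ∑ j ∈ Finset.range C, if t i j = true ∧ i+1 < R ∧ t (i+1) j = false then (1:Int) else 0)) := by ring
    _ = (∑ i ∈ Finset.range R, ∑ j ∈ Finset.range (C-1), (if t i j ≠ t i (j+1) then (1:Int) else 0))
        + (∑ i ∈ Finset.range (R-1), ∑ j ∈ Finset.range C, (if t i j ≠ t (i+1) j then (1:Int) else 0)) := by
      rw [hV, ← Finset.sum_add_distrib, Finset.sum_congr rfl (fun i _ => hH i)]

theorem pv_foldl_guard (l : List Int) (c : Int → Prop) [DecidablePred c]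
    (g1 g2 g3 g4 : Int → Int) (a : Int) :
    l.foldl (fun acc x => if c x then acc + g1 x + g2 x + g3 x + g4 x else acc) a
      = a + (l.map (fun x => if c x then g1 x + g2 x + g3 x + g4 x else 0)).sum := by
  have hfun : (fun (acc : Int) x => if c x then acc + g1 x + g2 x + g3 x + g4 x else acc)
      = fun acc x => acc + (if c x then g1 x + g2 x + g3 x + g4 x else 0) := by
    funext acc x
    by_cases h : c x
    · simp only [if_pos h]; ring
    · simp [h]
  rw [hfun, PySem.List.foldl_add]

theorem pv_cell_nat (m : List (List Int)) (a b : Nat) :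
    pvCell m (a : Int) (b : Int) = (m.getD a []).getD b 0 := by
  simp [pvCell]

theorem pv_point (m : List (List Int)) (i j : Nat) (hi : i < m.length) (hj : j < (m.headD []).length) :
    (if pvCell m (i:Int) (j:Int) ≠ 0 then
        (if -1 < (i:Int)-1 ∧ (i:Int)-1 < (m.length:Int) ∧ pvCell m ((i:Int)-1) (j:Int) = 0 then (1:Int) else 0)
        + (if -1 < (j:Int)-1 ∧ (j:Int)-1 < ((m.headD []).length:Int) ∧ pvCell m (i:Int) ((j:Int)-1) = 0 then 1 else 0)
        + (if -1 < (i:Int)+1 ∧ (i:Int)+1 < (m.length:Int) ∧ pvCell m ((i:Int)+1) (j:Int) = 0 then 1 else 0)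
        + (if -1 < (j:Int)+1 ∧ (j:Int)+1 < ((m.headD []).length:Int) ∧ pvCell m (i:Int) ((j:Int)+1) = 0 then 1 else 0)
      else 0)
    = (if pvT m i j = true then
        ((if 1 ≤ i ∧ pvT m (i-1) j = false then (1:Int) else 0)
          + (if 1 ≤ j ∧ pvT m i (j-1) = false then 1 else 0)
          + (if i+1 < m.length ∧ pvT m (i+1) j = false then 1 else 0)
          + (if j+1 < (m.headD []).length ∧ pvT m i (j+1) = false then 1 else 0))
        else 0) := by
  have e0 : (pvCell m (i:Int) (j:Int) ≠ 0) ↔ (pvT m i j = true) := by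
    simp [pv_cell_nat, pvT]
  have e1 : (if -1 < (i:Int)-1 ∧ (i:Int)-1 < (m.length:Int) ∧ pvCell m ((i:Int)-1) (j:Int) = 0 then (1:Int) else 0)
      = (if 1 ≤ i ∧ pvT m (i-1) j = false then 1 else 0) := by
    by_cases h : 1 ≤ i
    · have hc : ((i:Int)-1) = (((i-1 : Nat)) : Int) := by omega
      rw [hc, pv_cell_nat]
      refine if_congr ?_ rfl rfl
      constructor
      · rintro ⟨-, -, h3⟩; exact ⟨h, by simpa [pvT] using h3⟩
      · rintro ⟨-, h3⟩; exact ⟨by omega, by omega, by simpa [pvT] using h3⟩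
    · have hx : ¬(-1 < (i:Int)-1) := by omega
      simp [hx, h]
  have e2 : (if -1 < (j:Int)-1 ∧ (j:Int)-1 < ((m.headD []).length:Int) ∧ pvCell m (i:Int) ((j:Int)-1) = 0 then (1:Int) else 0)
      = (if 1 ≤ j ∧ pvT m i (j-1) = false then 1 else 0) := by
    by_cases h : 1 ≤ j
    · have hc : ((j:Int)-1) = (((j-1 : Nat)) : Int) := by omega
      rw [hc, pv_cell_nat]
      refine if_congr ?_ rfl rfl
      constructor
      · rintro ⟨-, -, h3⟩; exact ⟨h, by simpa [pvT] using h3⟩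
      · rintro ⟨-, h3⟩; exact ⟨by omega, by omega, by simpa [pvT] using h3⟩
    · have hx : ¬(-1 < (j:Int)-1) := by omega
      simp [hx, h]
  have e3 : (if -1 < (i:Int)+1 ∧ (i:Int)+1 < (m.length:Int) ∧ pvCell m ((i:Int)+1) (j:Int) = 0 then (1:Int) else 0)
      = (if i+1 < m.length ∧ pvT m (i+1) j = false then 1 else 0) := by
    have hc : ((i:Int)+1) = (((i+1 : Nat)) : Int) := by omega
    rw [hc, pv_cell_nat]
    refine if_congr ?_ rfl rfl
    constructor
    · rintro ⟨-, h2, h3⟩; exact ⟨by omega, by simpa [pvT] using h3⟩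
    · rintro ⟨h2, h3⟩; exact ⟨by omega, by omega, by simpa [pvT] using h3⟩
  have e4 : (if -1 < (j:Int)+1 ∧ (j:Int)+1 < ((m.headD []).length:Int) ∧ pvCell m (i:Int) ((j:Int)+1) = 0 then (1:Int) else 0)
      = (if j+1 < (m.headD []).length ∧ pvT m i (j+1) = false then 1 else 0) := by
    have hc : ((j:Int)+1) = (((j+1 : Nat)) : Int) := by omega
    rw [hc, pv_cell_nat]
    refine if_congr ?_ rfl rfl
    constructor
    · rintro ⟨-, h2, h3⟩; exact ⟨by omega, by simpa [pvT] using h3⟩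
    · rintro ⟨h2, h3⟩; exact ⟨by omega, by omega, by simpa [pvT] using h3⟩
  rw [e1, e2, e3, e4]
  exact if_congr e0 rfl rfl

theorem pv_A_sum (m : List (List Int)) :
    findCoverage m
      = ∑ i ∈ Finset.range m.length, ∑ j ∈ Finset.range (m.headD []).length,
          (if pvT m i j = true then
            ((if 1 ≤ i ∧ pvT m (i-1) j = false then (1:Int) else 0)
              + (if 1 ≤ j ∧ pvT m i (j-1) = false then 1 else 0)
              + (if i+1 < m.length ∧ pvT m (i+1) j = false then 1 else 0)
              + (if j+1 < (m.headD []).length ∧ pvT m i (j+1) = false then 1 else 0))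
            else 0) := by
  have houter :
      (fun (count i : Int) =>
        (PySem.List.pyRange 0 ((m.headD []).length : Int) 1).foldl (fun count j =>
          if pvCell m i j ≠ 0 then
            count + (if -1 < i-1 ∧ i-1 < (m.length:Int) ∧ pvCell m (i-1) j = 0 then 1 else 0)
                  + (if -1 < j-1 ∧ j-1 < ((m.headD []).length:Int) ∧ pvCell m i (j-1) = 0 then 1 else 0)
                  + (if -1 < i+1 ∧ i+1 < (m.length:Int) ∧ pvCell m (i+1) j = 0 then 1 else 0)
                  + (if -1 < j+1 ∧ j+1 < ((m.headD []).length:Int) ∧ pvCell m i (j+1) = 0 then 1 else 0)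
          else count) count)
      = fun count i => count +
          ((PySem.List.pyRange 0 ((m.headD []).length : Int) 1).map (fun j =>
            if pvCell m i j ≠ 0 then
              (if -1 < i-1 ∧ i-1 < (m.length:Int) ∧ pvCell m (i-1) j = 0 then 1 else 0)
              + (if -1 < j-1 ∧ j-1 < ((m.headD []).length:Int) ∧ pvCell m i (j-1) = 0 then 1 else 0)
              + (if -1 < i+1 ∧ i+1 < (m.length:Int) ∧ pvCell m (i+1) j = 0 then 1 else 0)
              + (if -1 < j+1 ∧ j+1 < ((m.headD []).length:Int) ∧ pvCell m i (j+1) = 0 then 1 else 0)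
            else 0)).sum :=
    funext fun count => funext fun i => pv_foldl_guard _ _ _ _ _ _ count
  show (PySem.List.pyRange 0 ((m.length:Nat) : Int) 1).foldl
      (fun count i =>
        (PySem.List.pyRange 0 ((m.headD []).length : Int) 1).foldl (fun count j =>
          if pvCell m i j ≠ 0 then
            count + (if -1 < i-1 ∧ i-1 < (m.length:Int) ∧ pvCell m (i-1) j = 0 then 1 else 0)
                  + (if -1 < j-1 ∧ j-1 < ((m.headD []).length:Int) ∧ pvCell m i (j-1) = 0 then 1 else 0)
                  + (if -1 < i+1 ∧ i+1 < (m.length:Int) ∧ pvCell m (i+1) j = 0 then 1 else 0)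
                  + (if -1 < j+1 ∧ j+1 < ((m.headD []).length:Int) ∧ pvCell m i (j+1) = 0 then 1 else 0)
          else count) count) 0 = _
  rw [houter, PySem.List.foldl_add, zero_add]
  simp only [PySem.List.pyRange_one, sub_zero, Int.toNat_natCast, List.map_map,
    Function.comp_def, zero_add]
  rw [pv_sum_map_range]
  refine Finset.sum_congr rfl (fun i hi => ?_)
  rw [pv_sum_map_range]
  refine Finset.sum_congr rfl (fun j hj => ?_)
  exact pv_point m i j (Finset.mem_range.mp hi) (Finset.mem_range.mp hj)

theorem pv_zip_tail_sum {α : Type} (r : List α) (w : α × α → Int) (d : α) :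
    ((r.zip r.tail).map w).sum
      = ∑ k ∈ Finset.range (r.length - 1), w (r.getD k d, r.getD (k+1) d) := by
  rw [pv_map_sum_getD _ _ (d, d)]
  have hzl : (r.zip r.tail).length = r.length - 1 := by
    rw [List.length_zip, List.length_tail]; omega
  rw [hzl]
  refine Finset.sum_congr rfl (fun k hk => ?_)
  have hk' : k < r.length - 1 := Finset.mem_range.mp hk
  have h1 : k < (r.zip r.tail).length := by omega
  have h2 : k < r.length := by omega
  have h3 : k < r.tail.length := by rw [List.length_tail]; omega
  have h4 : k + 1 < r.length := by omega
  rw [List.getD_eq_getElem _ _ h1, List.getElem_zip,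
    List.getD_eq_getElem _ _ h2, List.getD_eq_getElem _ _ h4]
  congr 1
  simp [List.getElem_tail]

theorem pv_zip_two_sum {α : Type} (r1 r2 : List α) (w : α × α → Int) (d : α)
    (h : r1.length = r2.length) :
    ((r1.zip r2).map w).sum
      = ∑ k ∈ Finset.range r1.length, w (r1.getD k d, r2.getD k d) := by
  rw [pv_map_sum_getD _ _ (d, d)]
  have hzl : (r1.zip r2).length = r1.length := by rw [List.length_zip]; omega
  rw [hzl]
  refine Finset.sum_congr rfl (fun k hk => ?_)
  have hk' : k < r1.length := Finset.mem_range.mp hk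
  have h1 : k < (r1.zip r2).length := by omega
  rw [List.getD_eq_getElem _ _ h1, List.getElem_zip,
    List.getD_eq_getElem _ _ hk', List.getD_eq_getElem _ _ (by omega : k < r2.length)]

theorem pv_B_sum (m : List (List Int)) (hPre : Pre_findCoverage m) :
    findCoverage_alt m
      = (∑ i ∈ Finset.range m.length, ∑ j ∈ Finset.range ((m.headD []).length - 1),
          (if pvT m i j ≠ pvT m i (j+1) then (1:Int) else 0))
        + (∑ i ∈ Finset.range (m.length - 1), ∑ j ∈ Finset.range (m.headD []).length,
          (if pvT m i j ≠ pvT m (i+1) j then (1:Int) else 0)) := by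
  obtain ⟨hne, hlen⟩ := hPre
  have hfold1 : ∀ (l : List (List Int)) (a : Int),
      l.foldl (fun count (r : List Int) =>
        (r.zip r.tail).foldl (fun count p => count + pvDiff p.1 p.2) count) a
      = a + (l.map (fun (r : List Int) => ((r.zip r.tail).map (fun p => pvDiff p.1 p.2)).sum)).sum := by
    intro l a
    have hfun : (fun (count : Int) (r : List Int) =>
        (r.zip r.tail).foldl (fun (count : Int) (p : Int × Int) => count + pvDiff p.1 p.2) count)
        = fun count (r : List Int) => count + ((r.zip r.tail).map (fun p => pvDiff p.1 p.2)).sum := by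
      funext c r; rw [PySem.List.foldl_add]
    rw [hfun, PySem.List.foldl_add]
  have hfold2 : ∀ (l : List (List Int × List Int)) (a : Int),
      l.foldl (fun count (q : List Int × List Int) =>
        (q.1.zip q.2).foldl (fun count p => count + pvDiff p.1 p.2) count) a
      = a + (l.map (fun (q : List Int × List Int) => ((q.1.zip q.2).map (fun p => pvDiff p.1 p.2)).sum)).sum := by
    intro l a
    have hfun : (fun (count : Int) (q : List Int × List Int) =>
        (q.1.zip q.2).foldl (fun (count : Int) (p : Int × Int) => count + pvDiff p.1 p.2) count)
        = fun count (q : List Int × List Int) => count + ((q.1.zip q.2).map (fun p => pvDiff p.1 p.2)).sum := by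
      funext c q; rw [PySem.List.foldl_add]
    rw [hfun, PySem.List.foldl_add]
  show (List.zip (List.map (fun r => PySem.List.slice r none (some ((m.headD []).length : Int))) m)
        (PySem.List.slice (List.map (fun r => PySem.List.slice r none (some ((m.headD []).length : Int))) m) (some 1) none)).foldl
      (fun count q => (q.1.zip q.2).foldl (fun count p => count + pvDiff p.1 p.2) count)
      ((List.map (fun r => PySem.List.slice r none (some ((m.headD []).length : Int))) m).foldl
        (fun count r => (r.zip (PySem.List.slice r (some 1) none)).foldl
          (fun count p => count + pvDiff p.1 p.2) count) 0)
      = _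
  simp only [PySem.List.slice_from_one, PySem.List.slice_to_natCast]
  rw [hfold2, hfold1, zero_add]
  have hrowlen : (m.map (fun r => List.take (m.headD []).length r)).length = m.length := by simp
  have hrow : ∀ i, i < m.length →
      (m.map (fun r => List.take (m.headD []).length r)).getD i [] = (m.getD i []).take (m.headD []).length := by
    intro i hi
    rw [List.getD_eq_getElem _ _ (by simpa using hi), List.getD_eq_getElem _ _ hi, List.getElem_map]
  have hlen_i : ∀ i, i < m.length →
      ((m.map (fun r => List.take (m.headD []).length r)).getD i []).length = (m.headD []).length := by
    intro i hi
    rw [hrow i hi, List.length_take]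
    have : (m.headD []).length ≤ (m.getD i []).length := by
      apply hlen
      rw [List.getD_eq_getElem _ _ hi]
      exact List.getElem_mem hi
    omega
  have hcell : ∀ i k, i < m.length → k < (m.headD []).length →
      ((m.map (fun r => List.take (m.headD []).length r)).getD i []).getD k 0 = (m.getD i []).getD k 0 := by
    intro i k hi hk
    rw [hrow i hi]
    have hkl : k < ((m.getD i []).take (m.headD []).length).length := by
      rw [← hrow i hi, hlen_i i hi]; exact hk
    have hkl2 : k < (m.getD i []).length := by
      have := hkl; rw [List.length_take] at this; omega
    rw [List.getD_eq_getElem _ _ hkl, List.getD_eq_getElem _ _ hkl2, List.getElem_take]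
  congr 1
  · -- horizontal part
    rw [pv_map_sum_getD _ _ [], hrowlen]
    refine Finset.sum_congr rfl (fun i hi => ?_)
    have hi' : i < m.length := Finset.mem_range.mp hi
    rw [pv_zip_tail_sum _ _ 0, hlen_i i hi']
    refine Finset.sum_congr rfl (fun k hk => ?_)
    have hk' : k < (m.headD []).length - 1 := Finset.mem_range.mp hk
    rw [hcell i k hi' (by omega), hcell i (k+1) hi' (by omega)]
    rfl
  · -- vertical part
    rw [pv_zip_tail_sum _ _ [], hrowlen]
    refine Finset.sum_congr rfl (fun i hi => ?_)
    have hi' : i < m.length - 1 := Finset.mem_range.mp hi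
    rw [pv_zip_two_sum _ _ _ 0 (by rw [hlen_i i (by omega), hlen_i (i+1) (by omega)]),
      hlen_i i (by omega)]
    refine Finset.sum_congr rfl (fun k hk => ?_)
    have hk' : k < (m.headD []).length := Finset.mem_range.mp hk
    rw [hcell i k (by omega) hk', hcell (i+1) k (by omega) hk']
    rfl

-- ===== VERDICT (by name: the statement is the Claim_ definition above) =====
theorem findCoverage_spec : Claim_equal_findCoverage := by
  intro m _ hPre
  unfold Spec_findCoverage
  rw [pv_A_sum m, pv_B_sum m hPre, pv_core]
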